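-- pv_equiv track=rewrite | github.com/The-Old-Cat/zbx-1c-py | packages/zbx-1c-rac/src/zbx_1c_rac/utils/converters.py | parse_rac_output
-- ===== SOURCE A (Python) =====
-- from typing import Any, Dict, List, Optional
--
-- def parse_rac_output(output: str) -> List[Dict[str, Any]]:
--     """
--     Парсинг вывода команды rac.
--
--     Формат вывода rac:
--         cluster: <uuid>
--         name: <name>
--         host: <host>
--
--     Args:
--         output: Вывод команды rac.
--
--     Returns:
--         Список словарей с данными.
--     """
--     result = []
--     current_item: Dict[str, Any] = {}
--
--     for line in output.split("\n"):
--         line = line.strip()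
--         if not line:
--             if current_item:
--                 result.append(current_item)
--                 current_item = {}
--             continue
--
--         if ":" in line:
--             key, value = line.split(":", 1)
--             key = key.strip()
--             value = value.strip()
--
--             # Преобразуем значения
--             if value.lower() == "true":
--                 value = True
--             elif value.lower() == "false":
--                 value = False
--             elif value.isdigit():
--                 value = int(value)
--
--             current_item[key] = value
--
--     # Добавляем последний элемент
--     if current_item:
--         result.append(current_item)
--
--     return result
-- ===== SOURCE B (Python) =====
-- def parse_rac_output(output):
--     """Group-then-build: first split the output into blocks of non-blank
--     (stripped) lines, then build one dict per block, keeping non-empty dicts."""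
--     blocks = []
--     cur = []
--     for line in output.split("\n"):
--         s = line.strip()
--         if s:
--             cur.append(s)
--         elif cur:
--             blocks.append(cur)
--             cur = []
--     if cur:
--         blocks.append(cur)
--
--     def build(block):
--         item = {}
--         for s in block:
--             if ":" in s:
--                 key, value = s.split(":", 1)
--                 key = key.strip()
--                 value = value.strip()
--                 if value.lower() == "true":
--                     value = True
--                 elif value.lower() == "false":
--                     value = False
--                 elif value.isdigit():
--                     value = int(value)
--                 item[key] = value
--         return item
--
--     return [d for d in map(build, blocks) if d]
-- ===== Notes on version B (the rewrite author's own statement) =====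
-- stated objective: idiomatic
-- what changed: A's single interleaved accumulate-and-flush loop is replaced by a group-then-build decomposition: one pass groups stripped lines into blank-separated blocks, a second pass builds a dict per block and keeps the non-empty ones.
import Mathlib
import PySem

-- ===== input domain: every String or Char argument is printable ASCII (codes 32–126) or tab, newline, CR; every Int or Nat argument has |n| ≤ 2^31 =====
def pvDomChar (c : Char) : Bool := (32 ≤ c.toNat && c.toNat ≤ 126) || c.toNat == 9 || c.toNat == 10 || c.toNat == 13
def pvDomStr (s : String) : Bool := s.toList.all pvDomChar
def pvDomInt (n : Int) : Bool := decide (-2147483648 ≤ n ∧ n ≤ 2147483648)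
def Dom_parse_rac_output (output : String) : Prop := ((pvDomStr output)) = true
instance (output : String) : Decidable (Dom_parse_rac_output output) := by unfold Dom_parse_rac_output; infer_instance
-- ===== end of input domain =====

-- B replaces A's interleaved accumulate-and-flush loop by a group-then-build decomposition
-- (group lines into blank-separated blocks, then build one dict per block); same cost.
-- Python's dict values here can be bool/int/str; the Lean value type is String, so the
-- coerced values are rendered as their canonical strings ("True"/"False", int(v) without
-- leading zeros) in BOTH ports alike; exact whenever every value stays a str.

-- ===== PORT A =====
-- shared per-line code (identical in both Pythons): 'if ":" in line: key, value = split/strip/coerce; item[key] = value'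
-- int(v) for a digit-only string v: drop leading zeros (exact for isdigit-true strings)
def pvDigitsToStr (v : List Char) : List Char :=
  let t := v.dropWhile (· == '0')
  if t.isEmpty then ['0'] else t

def pvCoerce (v : List Char) : List Char :=
  if PySem.Chars.lower v = "true".toList then "True".toList
  else if PySem.Chars.lower v = "false".toList then "False".toList
  else if PySem.Chars.strIsdigit v then pvDigitsToStr v
  else v

def pvParseLine (s : List Char) (d : PySem.Dict String String) : PySem.Dict String String :=
  if PySem.Chars.isIn [':'] s then
    let parts := PySem.Chars.splitOnMax s [':'] 1
    let key := PySem.Chars.strip (parts.headD [])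
    let value := PySem.Chars.strip ((parts.drop 1).headD [])
    d.insert (String.ofList key) (String.ofList (pvCoerce value))
  else d

-- A's loop: state (result, current_item), blank line flushes a non-empty current_item
def pvRunA : List (List Char) → List (List (String × String)) → PySem.Dict String String → List (List (String × String))
  | [], res, cur => if cur.items.isEmpty then res else res ++ [cur.items]
  | l :: ls, res, cur =>
    let s := PySem.Chars.strip l
    if s.isEmpty then
      if cur.items.isEmpty then pvRunA ls res cur
      else pvRunA ls (res ++ [cur.items]) PySem.Dict.empty
    else pvRunA ls res (pvParseLine s cur)

def parse_rac_output (output : String) : List (List (String × String)) :=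
  pvRunA (PySem.Chars.splitOn output.toList ['\n']) [] PySem.Dict.empty

-- ===== PORT B =====
-- pass 1: group the stripped lines into blank-separated blocks
def pvBlocks : List (List Char) → List (List (List Char)) → List (List Char) → List (List (List Char))
  | [], acc, cur => if cur.isEmpty then acc else acc ++ [cur]
  | l :: ls, acc, cur =>
    let s := PySem.Chars.strip l
    if s.isEmpty then
      if cur.isEmpty then pvBlocks ls acc cur
      else pvBlocks ls (acc ++ [cur]) []
    else pvBlocks ls acc (cur ++ [s])

-- pass 2: build one dict per block
def pvBuild (b : List (List Char)) : PySem.Dict String String :=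
  b.foldl (fun d s => pvParseLine s d) PySem.Dict.empty

def parse_rac_output_alt (output : String) : List (List (String × String)) :=
  ((((pvBlocks (PySem.Chars.splitOn output.toList ['\n']) [] []).map pvBuild).filter
      (fun d => !d.items.isEmpty)).map PySem.Dict.items)

-- ===== PRECONDITION & SPEC =====
def Spec_parse_rac_output (output : String) (out : List (List (String × String))) : Prop := out = parse_rac_output_alt output
instance (output : String) (out : List (List (String × String))) : Decidable (Spec_parse_rac_output output out) := by unfold Spec_parse_rac_output; infer_instance

-- ===== CLAIM (what is proved, stated in full; the proofs are below) =====
def Claim_equal_parse_rac_output : Prop := ∀ (output : String), Dom_parse_rac_output output → Spec_parse_rac_output output (parse_rac_output output)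

-- ===== LEMMAS AND PROOFS =====

theorem pvBlocks_acc (ls : List (List Char)) (acc : List (List (List Char))) (cur : List (List Char)) :
    pvBlocks ls acc cur = acc ++ pvBlocks ls [] cur := by
  induction ls generalizing acc cur with
  | nil => simp only [pvBlocks]; split <;> simp
  | cons l ls ih =>
    simp only [pvBlocks]
    by_cases hs : (PySem.Chars.strip l).isEmpty
    · by_cases hc : cur.isEmpty
      · simp only [hs, hc, if_true]; exact ih acc cur
      · simp [hs, hc, ih (acc ++ [cur]) [], ih [cur] []]
    · simp only [hs, if_false]
      exact ih acc (cur ++ [PySem.Chars.strip l])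

theorem pvBuild_concat (b : List (List Char)) (s : List Char) :
    pvBuild (b ++ [s]) = pvParseLine s (pvBuild b) := by
  simp [pvBuild]

def pvPipe (bs : List (List (List Char))) : List (List (String × String)) :=
  ((bs.map pvBuild).filter (fun d => !d.items.isEmpty)).map PySem.Dict.items

theorem pvRunA_eq_pipe (ls : List (List Char)) (res : List (List (String × String)))
    (cur : PySem.Dict String String) (curb : List (List Char)) (h : pvBuild curb = cur) :
    pvRunA ls res cur = res ++ pvPipe (pvBlocks ls [] curb) := by
  induction ls generalizing res cur curb with
  | nil =>
    simp only [pvRunA, pvBlocks]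
    by_cases hc : curb.isEmpty
    · have hcur : cur.items = [] := by
        rw [← h]; cases curb with
        | nil => rfl
        | cons a b => simp at hc
      simp [hc, hcur, pvPipe]
    · by_cases hi : cur.items.isEmpty
      · simp [hc, hi, pvPipe, h]
      · simp [hc, hi, pvPipe, h]
  | cons l ls ih =>
    simp only [pvRunA, pvBlocks]
    by_cases hs : (PySem.Chars.strip l).isEmpty
    · by_cases hi : cur.items.isEmpty
      · by_cases hc : curb.isEmpty
        · simp only [hs, hi, hc, if_true]
          exact ih res cur curb h
        · -- block of colon-less lines: its dict is empty, so B filters it out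
          have hcur : cur = PySem.Dict.empty := by
            cases cur with
            | mk items => cases items with
              | nil => rfl
              | cons p ps => simp [List.isEmpty_iff] at hi
          have h2 := ih res cur [] (by rw [hcur]; rfl)
          simp [hs, hc, pvBlocks_acc ls [curb] [], h2, pvPipe, h,
            List.isEmpty_iff.mp hi]
      · have hc : ¬ curb.isEmpty = true := by
          intro hc
          cases curb with
          | nil =>
            rw [← h] at hi
            exact hi rfl
          | cons a b => simp at hc
        have h2 := ih (res ++ [cur.items]) PySem.Dict.empty [] rfl
        simp [hs, hi, hc, pvBlocks_acc ls [curb] [], h2, pvPipe, h]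
    · simp only [hs]
      exact ih res (pvParseLine (PySem.Chars.strip l) cur) (curb ++ [PySem.Chars.strip l])
        (by rw [pvBuild_concat, h])

-- ===== VERDICT (by name: the statement is the Claim_ definition above) =====
theorem parse_rac_output_spec : Claim_equal_parse_rac_output := by
  intro output _
  unfold Spec_parse_rac_output parse_rac_output parse_rac_output_alt
  rw [pvRunA_eq_pipe _ [] PySem.Dict.empty [] rfl]
  rfl
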